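-- pv_equiv track=rewrite | github.com/artemio77/accumulo-docker | code/ml/notebooks/parse_10Q.py | next_section_name
-- ===== SOURCE A (Python) =====
-- from typing import Dict
--
-- def next_section_name(key: str, elements: Dict[str, str]):
--     ki = dict()
--     ik = dict()
--     for i, k in enumerate(elements):
--         ki[k] = i  # dictionary index_of_key
--         ik[i] = k  # dictionary key_of_index
--     offset = 1  # (1 for next key, but can be any existing distance)
--
--     # Get next key in Dictionary
--     index_of_key = ki[key]
--     index_of_next_key = index_of_key + offset
--     next_key = ik[index_of_next_key] if index_of_next_key in ik else None
--     return elements.get(next_key)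
-- ===== SOURCE B (Python) =====
-- def next_section_name(key, elements):
--     items = iter(elements.items())
--     for k, _ in items:
--         if k == key:
--             return next(items, (None, None))[1]
--     raise KeyError(key)
-- ===== Notes on version B (the rewrite author's own statement) =====
-- stated objective: simpler
-- what changed: Replaced building two index dictionaries (key->index, index->key) plus offset arithmetic and a final dict.get with a single early-exiting scan over the items that returns the value of the pair immediately after the matching key (KeyError after the loop, None when the key is last).
import Mathlib
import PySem

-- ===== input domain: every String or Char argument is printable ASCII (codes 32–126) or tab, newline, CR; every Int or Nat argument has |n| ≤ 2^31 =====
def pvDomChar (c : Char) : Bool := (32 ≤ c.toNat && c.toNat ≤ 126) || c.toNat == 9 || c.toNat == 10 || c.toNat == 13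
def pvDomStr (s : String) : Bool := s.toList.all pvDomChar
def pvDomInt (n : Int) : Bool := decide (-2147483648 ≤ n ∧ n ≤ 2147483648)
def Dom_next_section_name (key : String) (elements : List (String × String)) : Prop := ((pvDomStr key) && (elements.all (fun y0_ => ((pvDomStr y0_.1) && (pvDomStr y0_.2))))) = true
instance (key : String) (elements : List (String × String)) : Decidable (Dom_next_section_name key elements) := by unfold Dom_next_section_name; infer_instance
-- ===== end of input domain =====

-- B replaces A's two index dictionaries and offset arithmetic by one early-exiting scan of the
-- items that returns the value of the pair right after the matching key (objective: simpler).

-- ===== PORT A =====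
def next_section_name (key : String) (elements : List (String × String)) : Option String :=
  -- the Python parameter is a dict; the association list denotes that dict
  let d := PySem.Dict.ofList elements
  -- ki = dict(); ik = dict(); for i, k in enumerate(elements): ki[k] = i; ik[i] = k
  let st := (PySem.List.enumerate d.keys).foldl
      (fun (p : PySem.Dict String Int × PySem.Dict Int String) ik =>
        (p.1.insert ik.2 ik.1, p.2.insert ik.1 ik.2))
      (PySem.Dict.empty, PySem.Dict.empty)
  let ki := st.1
  let ik := st.2
  match ki.get? key with
  | none => none  -- 'ki[key]' raises KeyError here; excluded by Pre_
  | some index_of_key =>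
    -- offset = 1; index_of_next_key = index_of_key + offset
    let index_of_next_key := index_of_key + 1
    -- next_key = ik[index_of_next_key] if index_of_next_key in ik else None
    let next_key : Option String := ik.get? index_of_next_key
    -- return elements.get(next_key)   (elements.get(None) is None)
    match next_key with
    | none => none
    | some nk => d.get? nk

-- ===== PORT B =====
-- for k, _ in items: if k == key: return next(items, (None, None))[1]; after the loop: raise KeyError
def nsnScan (key : String) : List (String × String) → Option String
  | [] => none  -- 'raise KeyError(key)'; excluded by Pre_
  | (k, _) :: rest => if k = key then rest.head?.map Prod.snd else nsnScan key rest

def next_section_name_alt (key : String) (elements : List (String × String)) : Option String :=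
  nsnScan key (PySem.Dict.ofList elements).items

-- ===== PRECONDITION & SPEC =====
-- Pre_ excludes (1) inputs whose key is absent, on which A raises KeyError, and (2) association
-- lists with duplicate keys, which do not denote distinct entries of the Python dict parameter.
def Pre_next_section_name (key : String) (elements : List (String × String)) : Prop :=
  (elements.map Prod.fst).Nodup ∧ key ∈ elements.map Prod.fst
instance (key : String) (elements : List (String × String)) : Decidable (Pre_next_section_name key elements) := by unfold Pre_next_section_name; infer_instance

def pvWitness_next_section_name : String × (List (String × String)) :=
  ("b", [("a", "1"), ("b", "2"), ("c", "3")])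

def Spec_next_section_name (key : String) (elements : List (String × String)) (out : Option String) : Prop := out = next_section_name_alt key elements
instance (key : String) (elements : List (String × String)) (out : Option String) : Decidable (Spec_next_section_name key elements out) := by unfold Spec_next_section_name; infer_instance

-- ===== CLAIM (what is proved, stated in full; the proofs are below) =====
def Claim_equal_next_section_name : Prop := ∀ (key : String) (elements : List (String × String)), Dom_next_section_name key elements → Pre_next_section_name key elements → Spec_next_section_name key elements (next_section_name key elements)

-- ===== LEMMAS AND PROOFS =====

-- ofList of a duplicate-free association list keeps the list as its items
theorem items_ofList_nodup (l : List (String × String)) (h : (l.map Prod.fst).Nodup) :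
    (PySem.Dict.ofList l).items = l := by
  have := PySem.Dict.items_foldl_insert_fresh l Prod.fst Prod.snd PySem.Dict.empty
    (by simp) h
  simpa [PySem.Dict.ofList] using this

-- A's pair-building fold splits into two independent dict-building folds
theorem ki_ik_split (ks : List String) :
    (PySem.List.enumerate ks).foldl
      (fun (p : PySem.Dict String Int × PySem.Dict Int String) ik =>
        (p.1.insert ik.2 ik.1, p.2.insert ik.1 ik.2))
      (PySem.Dict.empty, PySem.Dict.empty)
    = ((PySem.List.enumerate ks).foldl (fun d q => d.insert q.2 q.1) PySem.Dict.empty,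
       (PySem.List.enumerate ks).foldl (fun d q => d.insert q.1 q.2) PySem.Dict.empty) :=
  PySem.List.foldl_prod_mk (fun (d : PySem.Dict String Int) (q : Int × String) => d.insert q.2 q.1)
    (fun (d : PySem.Dict Int String) (q : Int × String) => d.insert q.1 q.2) _ _ _

theorem ki_items (ks : List String) (h : ks.Nodup) :
    ((PySem.List.enumerate ks).foldl (fun d q => d.insert q.2 q.1) PySem.Dict.empty).items
    = (PySem.List.enumerate ks).map (fun q => (q.2, q.1)) := by
  have := PySem.Dict.items_foldl_insert_fresh (PySem.List.enumerate ks) Prod.snd Prod.fst PySem.Dict.empty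
    (by simp) (by simpa [PySem.List.map_snd_enumerate] using h)
  simpa using this

theorem ik_items (ks : List String) :
    ((PySem.List.enumerate ks).foldl (fun d q => d.insert q.1 q.2) PySem.Dict.empty).items
    = PySem.List.enumerate ks := by
  have := PySem.Dict.items_foldl_insert_fresh (PySem.List.enumerate ks) Prod.fst Prod.snd PySem.Dict.empty
    (by simp) ?_
  · simpa using this
  · rw [PySem.List.map_fst_enumerate]
    exact PySem.List.nodup_pyRange_one 0 _

-- B equals the reference "value of the element after the key's first index"
theorem nsnScan_spec (key : String) (l : List (String × String))
    (hk : key ∈ l.map Prod.fst) :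
    nsnScan key l = (l[(l.map Prod.fst).idxOf key + 1]?).map Prod.snd := by
  induction l with
  | nil => simp at hk
  | cons p rest ih =>
    obtain ⟨k, v⟩ := p
    by_cases h : k = key
    · subst h
      simp [nsnScan, List.head?_eq_getElem?]
    · have hk' : key ∈ rest.map Prod.fst := by
        simpa [Ne.symm h] using hk
      simp only [nsnScan, if_neg h, List.map_cons, List.idxOf_cons]
      simp [ih hk']
      simp [Bool.cond_eq_ite, h]

-- A equals the same reference on duplicate-free lists containing the key
theorem portA_spec (key : String) (l : List (String × String))
    (h : (l.map Prod.fst).Nodup) (hk : key ∈ l.map Prod.fst) :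
    next_section_name key l = (l[(l.map Prod.fst).idxOf key + 1]?).map Prod.snd := by
  set ks := l.map Prod.fst with hks
  set n := ks.idxOf key with hn
  have hnlt : n < ks.length := List.idxOf_lt_length_of_mem hk
  have hksn : ks[n] = key := List.getElem_idxOf hnlt
  have hitems : (PySem.Dict.ofList l).items = l := items_ofList_nodup l h
  have hkeys : (PySem.Dict.ofList l).keys = ks := by
    simp only [PySem.Dict.keys, hitems, hks]
  simp only [next_section_name, hkeys, ki_ik_split]
  have hkiNodup : ((PySem.List.enumerate ks).foldl (fun d q => d.insert q.2 q.1) PySem.Dict.empty).keys.Nodup := by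
    simp only [PySem.Dict.keys, ki_items ks h, List.map_map]
    have hc : ((fun x : String × Int => x.1) ∘ fun q : Int × String => (q.2, q.1)) = fun q : Int × String => q.2 := rfl
    rw [hc, PySem.List.map_snd_enumerate]
    exact h
  have hki : ((PySem.List.enumerate ks).foldl (fun d q => d.insert q.2 q.1) PySem.Dict.empty).get? key
      = some (n : Int) := by
    rw [PySem.Dict.get?_eq_some_iff_mem_items _ _ _ hkiNodup, ki_items ks h]
    refine List.mem_map.2 ⟨((n : Int), key), ?_, rfl⟩
    rw [PySem.List.mem_enumerate_iff]
    exact ⟨n, hnlt, by simp [hksn]⟩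
  have hikNodup : ((PySem.List.enumerate ks).foldl (fun d q => d.insert q.1 q.2) PySem.Dict.empty).keys.Nodup := by
    simp only [PySem.Dict.keys, ik_items ks, PySem.List.map_fst_enumerate]
    exact PySem.List.nodup_pyRange_one 0 _
  simp only [hki]
  by_cases hlt : n + 1 < ks.length
  · -- the key has a successor
    have hik : ((PySem.List.enumerate ks).foldl (fun d q => d.insert q.1 q.2) PySem.Dict.empty).get? ((n : Int) + 1)
        = some ks[n+1] := by
      rw [PySem.Dict.get?_eq_some_iff_mem_items _ _ _ hikNodup, ik_items ks,
        PySem.List.mem_enumerate_iff]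
      exact ⟨n + 1, hlt, by push_cast; ring_nf⟩
    have hd : (PySem.Dict.ofList l).get? ks[n+1] = some (l[n+1]'(by simpa [hks] using hlt)).2 := by
      rw [PySem.Dict.get?_eq_some_iff_mem_items _ _ _ (by rw [PySem.Dict.keys, hitems]; exact h), hitems]
      have : ks[n+1] = (l[n+1]'(by simpa [hks] using hlt)).1 := by simp [hks]
      rw [this]
      exact List.getElem_mem _
    simp only [hik, hd]
    rw [List.getElem?_eq_getElem (by simpa [hks] using hlt)]
    rfl
  · -- the key is the last element
    have hik : ((PySem.List.enumerate ks).foldl (fun d q => d.insert q.1 q.2) PySem.Dict.empty).get? ((n : Int) + 1)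
        = none := by
      rw [PySem.Dict.get?_eq_none_iff_not_mem_keys]
      simp only [PySem.Dict.keys, ik_items ks, PySem.List.map_fst_enumerate, PySem.List.mem_pyRange_one]
      omega
    rw [hik]
    rw [List.getElem?_eq_none (by have h2 := hlt; simp only [hks, List.length_map] at h2; omega)]
    rfl

-- ===== VERDICT (by name: the statement is the Claim_ definition above) =====
theorem next_section_name_spec : Claim_equal_next_section_name := by
  intro key elements _ hpre
  unfold Spec_next_section_name next_section_name_alt
  rw [items_ofList_nodup elements hpre.1, portA_spec key elements hpre.1 hpre.2,
      nsnScan_spec key elements hpre.2]
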